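-- pv_equiv track=rewrite | github.com/UjwalNagrikar/Qunat-Algo-Models | t.py | build_roll_dates
-- ===== SOURCE A (Python) =====
-- ROLL_DAY_BEFORE = 1     # roll N trading days before expiry
--
-- def build_roll_dates(expiries: list, trading_dates: list) -> set:
--     pos = {d: i for i, d in enumerate(trading_dates)}
--     roll_dates = set()
--     for exp in expiries:
--         cands = [d for d in trading_dates if d <= exp]
--         if not cands: continue
--         roll_dates.add(trading_dates[max(0, pos[cands[-1]] - ROLL_DAY_BEFORE)])
--     return roll_dates
-- ===== SOURCE B (Python) =====
-- ROLL_DAY_BEFORE = 1     # roll N trading days before expiry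
--
--
-- def _roll_for(trading_dates, exp):
--     # scan from the right for the last trading date <= exp; early exit
--     for i in range(len(trading_dates) - 1, -1, -1):
--         if trading_dates[i] <= exp:
--             return trading_dates[max(0, i - ROLL_DAY_BEFORE)]
--     return None
--
--
-- def build_roll_dates(expiries: list, trading_dates: list) -> set:
--     out = set()
--     for exp in expiries:
--         v = _roll_for(trading_dates, exp)
--         if v is not None:
--             out.add(v)
--     return out
-- ===== Notes on version B (the rewrite author's own statement) =====
-- stated objective: simpler
-- what changed: Replaced A's position dict plus per-expiry filtered candidate list and dict lookup by a single early-exit reverse scan per expiry that finds the last trading date <= expiry directly.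
import Mathlib
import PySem

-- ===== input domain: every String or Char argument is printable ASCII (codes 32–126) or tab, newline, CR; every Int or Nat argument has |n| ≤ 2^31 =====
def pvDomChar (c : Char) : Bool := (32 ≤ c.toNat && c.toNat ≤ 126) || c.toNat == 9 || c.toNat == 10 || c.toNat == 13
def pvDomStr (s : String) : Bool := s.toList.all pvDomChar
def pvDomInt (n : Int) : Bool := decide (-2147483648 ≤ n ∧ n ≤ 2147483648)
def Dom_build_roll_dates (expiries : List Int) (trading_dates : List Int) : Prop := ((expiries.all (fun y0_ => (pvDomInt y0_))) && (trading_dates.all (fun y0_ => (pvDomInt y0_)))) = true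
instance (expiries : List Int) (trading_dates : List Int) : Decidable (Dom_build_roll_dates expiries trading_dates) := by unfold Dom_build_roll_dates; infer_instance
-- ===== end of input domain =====

-- B replaces A's position dict + per-expiry candidate list by a single early-exit
-- reverse scan per expiry (objective: simpler); return values proved equal everywhere.

-- ===== PORT A =====
-- pos = {d: i for i, d in enumerate(trading_dates)}
def posDict (trading_dates : List Int) : PySem.Dict Int Int :=
  (PySem.List.enumerate trading_dates).foldl (fun d p => d.insert p.2 p.1) PySem.Dict.empty

def build_roll_dates (expiries : List Int) (trading_dates : List Int) : List Int :=
  let pos := posDict trading_dates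
  expiries.foldl (fun roll_dates exp =>
    let cands := trading_dates.filter (fun d => decide (d ≤ exp))
    match PySem.List.pyGet? cands (-1) with
    | none => roll_dates                 -- if not cands: continue
    | some last =>
      -- pos[cands[-1]]: KeyError impossible, cands[-1] ∈ trading_dates; getD 0 is exact here
      let i := (pos.get? last).getD 0
      -- trading_dates[max(0, i - 1)]: index always in range here; getD 0 is exact
      PySem.Set.add roll_dates (PySem.List.pyGetD trading_dates (max 0 (i - 1)) 0))
    PySem.Set.empty

-- ===== PORT B =====
-- helper _roll_for: 'for i in range(len(td)-1, -1, -1): if td[i] <= exp: return td[max(0,i-1)]'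
-- ported as recursion on the counter m = current index + 1 (m = len .. 0)
def rollFor (trading_dates : List Int) (exp : Int) : Nat → Option Int
  | 0 => none
  | m + 1 =>
    if PySem.List.pyGetD trading_dates (m : Int) 0 ≤ exp then
      some (PySem.List.pyGetD trading_dates (max 0 ((m : Int) - 1)) 0)
    else rollFor trading_dates exp m

def build_roll_dates_alt (expiries : List Int) (trading_dates : List Int) : List Int :=
  expiries.foldl (fun out exp =>
    match rollFor trading_dates exp trading_dates.length with
    | none => out
    | some v => PySem.Set.add out v)
    PySem.Set.empty

-- ===== PRECONDITION & SPEC =====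
def Spec_build_roll_dates (expiries : List Int) (trading_dates : List Int) (out : List Int) : Prop := out = build_roll_dates_alt expiries trading_dates
instance (expiries : List Int) (trading_dates : List Int) (out : List Int) : Decidable (Spec_build_roll_dates expiries trading_dates out) := by unfold Spec_build_roll_dates; infer_instance

-- ===== CLAIM (what is proved, stated in full; the proofs are below) =====
def Claim_equal_build_roll_dates : Prop := ∀ (expiries : List Int) (trading_dates : List Int), Dom_build_roll_dates expiries trading_dates → Spec_build_roll_dates expiries trading_dates (build_roll_dates expiries trading_dates)

-- ===== LEMMAS AND PROOFS =====

-- "last index below m whose element satisfies q", the common reference function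
def lastIdx (td : List Int) (q : Int → Bool) : Nat → Option Nat
  | 0 => none
  | m + 1 => if q (td.getD m 0) then some m else lastIdx td q m

theorem lastIdx_eq_some_iff (td : List Int) (q : Int → Bool) (m j : Nat) :
    lastIdx td q m = some j ↔ (j < m ∧ q (td.getD j 0) = true ∧ ∀ i, j < i → i < m → q (td.getD i 0) = false) := by
  induction m with
  | zero => simp [lastIdx]
  | succ m ih =>
    simp only [lastIdx]
    split_ifs with h
    · constructor
      · intro he
        have hjm : m = j := by simpa using he
        subst hjm
        exact ⟨Nat.lt_succ_self m, h, fun i h1 h2 => absurd h1 (by omega)⟩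
      · rintro ⟨hj, hq, hmax⟩
        rcases Nat.lt_succ_iff_lt_or_eq.mp hj with h' | rfl
        · exact absurd h (by simpa using hmax m h' (Nat.lt_succ_self m))
        · rfl
    · rw [ih]
      constructor
      · rintro ⟨hj, hq, hmax⟩
        refine ⟨by omega, hq, fun i h1 h2 => ?_⟩
        rcases Nat.lt_succ_iff_lt_or_eq.mp h2 with h' | rfl
        · exact hmax i h1 h'
        · simpa using h
      · rintro ⟨hj, hq, hmax⟩
        have hjm : j ≠ m := by rintro rfl; exact h (by simpa using hq)
        exact ⟨by omega, hq, fun i h1 h2 => hmax i h1 (by omega)⟩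

theorem lastIdx_lt (td : List Int) (q : Int → Bool) (m j : Nat) (h : lastIdx td q m = some j) : j < m :=
  ((lastIdx_eq_some_iff td q m j).mp h).1

-- lastIdx only looks at the first m elements
theorem lastIdx_append (ys : List Int) (d : Int) (q : Int → Bool) (m : Nat) (hm : m ≤ ys.length) :
    lastIdx (ys ++ [d]) q m = lastIdx ys q m := by
  induction m with
  | zero => rfl
  | succ k ihk =>
    have hk : k < ys.length := hm
    have : (ys ++ [d]).getD k 0 = ys.getD k 0 := by
      simp [List.getD, List.getElem?_append_left hk]
    simp only [lastIdx, this, ihk (by omega)]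

theorem getD_append_last (ys : List Int) (d : Int) : (ys ++ [d]).getD ys.length 0 = d := by
  simp [List.getD]

-- B's helper equals the reference function
theorem rollFor_eq (td : List Int) (exp : Int) (m : Nat) (hm : m ≤ td.length) :
    rollFor td exp m = (lastIdx td (fun d => decide (d ≤ exp)) m).map (fun j => td.getD (j - 1) 0) := by
  induction m with
  | zero => simp [rollFor, lastIdx]
  | succ m ih =>
    have hget : PySem.List.pyGetD td ((m : Nat) : Int) 0 = td.getD m 0 := by
      simp [PySem.List.pyGetD_natCast, List.getD]
    simp only [rollFor, lastIdx, hget]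
    by_cases h : td.getD m 0 ≤ exp
    · rw [if_pos h, if_pos (by simpa using h)]
      simp only [Option.map_some]
      congr 1
      rcases Nat.eq_zero_or_pos m with rfl | hpos
      · norm_num [PySem.List.pyGetD_zero, List.getD]
      · have hmax : max 0 ((m : Int) - 1) = ((m - 1 : Nat) : Int) := by omega
        rw [hmax]
        simp [PySem.List.pyGetD_natCast, List.getD]
    · rw [if_neg h, if_neg (by simpa using h), ih (by omega)]

-- getLast? of a filter equals the reference function applied to the whole list
theorem filter_getLast?_eq (td : List Int) (q : Int → Bool) :
    (td.filter q).getLast? = (lastIdx td q td.length).map (fun j => td.getD j 0) := by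
  induction td using List.reverseRecOn with
  | nil => simp [lastIdx]
  | append_singleton ys d ih =>
    have hlen : (ys ++ [d]).length = ys.length + 1 := by simp
    rw [hlen]
    simp only [lastIdx, getD_append_last]
    split_ifs with h
    · simp [List.filter_append, h]
    · rw [List.filter_append]
      simp only [List.filter_cons, h, List.filter_nil, if_neg, Bool.false_eq_true,
        not_false_iff, List.append_nil]
      rw [ih, lastIdx_append ys d q ys.length (le_refl _)]
      rcases hj : lastIdx ys q ys.length with _ | j
      · simp
      · have hjlt := lastIdx_lt ys q ys.length j hj
        simp [List.getD, List.getElem?_append_left hjlt]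

-- the position dict maps each value to its LAST index in trading_dates
def lastOcc (td : List Int) (v : Int) : Option Nat := lastIdx td (fun d => decide (d = v)) td.length

theorem posDict_get? (td : List Int) (v : Int) :
    (posDict td).get? v = (lastOcc td v).map (fun j => (j : Int)) := by
  unfold posDict lastOcc
  induction td using List.reverseRecOn with
  | nil => simp [lastIdx, PySem.Dict.get?_empty]
  | append_singleton ys d ih =>
    rw [PySem.List.enumerate_append, List.foldl_append]
    simp only [PySem.List.enumerate_cons, PySem.List.enumerate_nil, List.foldl_cons, List.foldl_nil]
    have hlen : (ys ++ [d]).length = ys.length + 1 := by simp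
    rw [hlen]
    simp only [lastIdx, getD_append_last]
    by_cases hv : d = v
    · subst hv
      rw [PySem.Dict.get?_insert_self]
      simp
    · rw [PySem.Dict.get?_insert, if_neg (Ne.symm hv), ih,
        lastIdx_append ys d (fun x => decide (x = v)) ys.length (le_refl _)]
      simp [hv]

-- per-expiry: A's added value (as an Option) equals B's helper
theorem aStep_eq_rollFor (td : List Int) (exp : Int) :
    (match PySem.List.pyGet? (td.filter (fun d => decide (d ≤ exp))) (-1) with
      | none => (none : Option Int)
      | some last =>
        some (PySem.List.pyGetD td (max 0 ((((posDict td).get? last).getD 0) - 1)) 0)) =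
    rollFor td exp td.length := by
  rw [PySem.List.pyGet?_neg_one, rollFor_eq td exp td.length (le_refl _), filter_getLast?_eq]
  rcases hj : lastIdx td (fun d => decide (d ≤ exp)) td.length with _ | j
  · rfl
  · obtain ⟨hjlt, hq, hmax⟩ := (lastIdx_eq_some_iff td (fun d => decide (d ≤ exp)) td.length j).mp hj
    simp only [Option.map_some]
    -- the dict lookup at value td.getD j 0 returns j: j IS the last occurrence of that value,
    -- since every later element is > exp ≥ td.getD j 0
    have hocc : lastOcc td (td.getD j 0) = some j := by
      unfold lastOcc
      rw [lastIdx_eq_some_iff]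
      refine ⟨hjlt, by simp, fun i h1 h2 => ?_⟩
      have hqi := hmax i h1 h2
      simp only [decide_eq_true_eq] at hq
      simp only [decide_eq_false_iff_not, not_le] at hqi
      simp only [decide_eq_false_iff_not]
      intro heq; rw [heq] at hqi; omega
    rw [posDict_get? td (td.getD j 0), hocc]
    show some (PySem.List.pyGetD td (max 0 ((j : Int) - 1)) 0) = some (td.getD (j - 1) 0)
    congr 1
    rcases Nat.eq_zero_or_pos j with rfl | hpos
    · norm_num [PySem.List.pyGetD_zero, List.getD]
    · have hmax0 : max 0 ((j : Int) - 1) = ((j - 1 : Nat) : Int) := by omega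
      rw [hmax0]
      simp [PySem.List.pyGetD_natCast, List.getD]

-- the two per-expiry step functions agree on every accumulator
theorem step_eq (td : List Int) (exp : Int) (s : List Int) :
    (match PySem.List.pyGet? (td.filter (fun d => decide (d ≤ exp))) (-1) with
      | none => s
      | some last =>
        PySem.Set.add s (PySem.List.pyGetD td (max 0 ((((posDict td).get? last).getD 0) - 1)) 0)) =
    (match rollFor td exp td.length with
      | none => s
      | some v => PySem.Set.add s v) := by
  have h := aStep_eq_rollFor td exp
  rcases hA : PySem.List.pyGet? (td.filter (fun d => decide (d ≤ exp))) (-1) with _ | last <;>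
    rw [hA] at h <;> rw [← h]

-- ===== VERDICT (by name: the statement is the Claim_ definition above) =====
theorem build_roll_dates_spec : Claim_equal_build_roll_dates := by
  intro expiries trading_dates _
  unfold Spec_build_roll_dates build_roll_dates build_roll_dates_alt
  exact congrArg (fun f => expiries.foldl f PySem.Set.empty)
    (funext fun s => funext fun exp => step_eq trading_dates exp s)
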